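-- pv_equiv track=rewrite | github.com/marlowe518/Awesome-Differential-Privacy-and-Meachine-Learning | GNN/link_prediction_samll_dataset/seal_link_pred_for_small_data_with_dp.py | compute_max_terms_per_edge_for_path_deprecated
-- ===== SOURCE A (Python) =====
-- import math
--
-- def compute_max_terms_per_edge_for_path_deprecated(path_length, max_node_degree, lamda=1):
--     hop = math.floor((path_length - 1) / 2)
--     max_terms = 0
--     for i in range(hop):
--         max_terms += 2 * lamda * max_node_degree ** (i + 1)
--     tail_node_num = min((1 + lamda) * max_node_degree, max_node_degree ** hop)
--     head_node_num = max_node_degree ** hop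
--     max_terms += head_node_num * tail_node_num
--     return max_terms
-- ===== SOURCE B (Python) =====
-- import math
--
-- def compute_max_terms_per_edge_for_path_deprecated(path_length, max_node_degree, lamda=1):
--     # Closed-form geometric series instead of the O(hop) loop.
--     hop = (path_length - 1) // 2
--     d = max_node_degree
--     if d == 1:
--         series = 2 * lamda * hop
--     else:
--         # sum_{i=1}^{hop} d**i = (d**(hop+1) - d) / (d - 1), an exact integer division
--         series = 2 * lamda * (pow(d, hop + 1) - d) // (d - 1)
--     head = pow(d, hop)
--     return series + head * min((1 + lamda) * d, head)
-- ===== Notes on version B (the rewrite author's own statement) =====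
-- stated objective: faster
-- what changed: Replaced the O(hop) accumulation loop by the closed-form geometric-series formula 2*lamda*(d**(hop+1)-d)//(d-1) with fast pow, special-casing degree 1.
-- outside the precondition, e.g. on compute_max_terms_per_edge_for_path_deprecated(0, 2, 1): A returns 0.25, B returns -1.75
import Mathlib
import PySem

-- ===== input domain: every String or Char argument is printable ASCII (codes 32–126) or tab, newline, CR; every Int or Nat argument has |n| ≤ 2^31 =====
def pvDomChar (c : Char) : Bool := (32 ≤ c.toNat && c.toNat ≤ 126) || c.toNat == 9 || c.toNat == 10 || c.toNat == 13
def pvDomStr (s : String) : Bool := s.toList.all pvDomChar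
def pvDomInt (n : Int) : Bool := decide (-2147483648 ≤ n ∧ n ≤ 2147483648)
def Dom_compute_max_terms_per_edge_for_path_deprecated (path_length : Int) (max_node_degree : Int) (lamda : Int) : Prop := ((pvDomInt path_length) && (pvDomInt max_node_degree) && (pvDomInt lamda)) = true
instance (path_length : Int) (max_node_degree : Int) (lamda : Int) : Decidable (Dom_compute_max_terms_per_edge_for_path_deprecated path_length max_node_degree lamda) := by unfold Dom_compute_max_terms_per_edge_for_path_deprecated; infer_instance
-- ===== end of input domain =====

-- ===== PORT A =====
-- Literal port of A: math.floor((path_length-1)/2) is exact floor division within Dom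
-- (doubles are exact below 2^53); '**' exponents are nonnegative under Pre_, so .toNat is exact there.
def compute_max_terms_per_edge_for_path_deprecated (path_length : Int) (max_node_degree : Int) (lamda : Int) : Int :=
  let hop : Int := PySem.Int.floordiv (path_length - 1) 2
  let max_terms : Int :=
    (PySem.List.pyRange 0 hop 1).foldl
      (fun acc i => acc + 2 * lamda * max_node_degree ^ (i + 1).toNat) 0
  let tail_node_num : Int := min ((1 + lamda) * max_node_degree) (max_node_degree ^ hop.toNat)
  let head_node_num : Int := max_node_degree ^ hop.toNat
  max_terms + head_node_num * tail_node_num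

-- ===== PORT B =====
-- Port of B: closed-form geometric series, special-casing degree 1.
def compute_max_terms_per_edge_for_path_deprecated_alt (path_length : Int) (max_node_degree : Int) (lamda : Int) : Int :=
  let hop : Int := PySem.Int.floordiv (path_length - 1) 2
  let d : Int := max_node_degree
  let series : Int :=
    if d = 1 then 2 * lamda * hop
    else PySem.Int.floordiv (2 * lamda * (d ^ (hop + 1).toNat - d)) (d - 1)
  let head : Int := d ^ hop.toNat
  series + head * min ((1 + lamda) * d) head

-- ===== PRECONDITION & SPEC =====
-- Pre_ excludes path_length <= 0, where hop < 0 and Python's '** hop' yields a float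
-- (or raises ZeroDivisionError for degree 0), so A returns no int there.
def Pre_compute_max_terms_per_edge_for_path_deprecated (path_length : Int) (max_node_degree : Int) (lamda : Int) : Prop := 1 <= path_length
instance (path_length : Int) (max_node_degree : Int) (lamda : Int) : Decidable (Pre_compute_max_terms_per_edge_for_path_deprecated path_length max_node_degree lamda) := by unfold Pre_compute_max_terms_per_edge_for_path_deprecated; infer_instance
def pvWitness_compute_max_terms_per_edge_for_path_deprecated : Int × Int × Int := (7, 3, 2)
def Spec_compute_max_terms_per_edge_for_path_deprecated (path_length : Int) (max_node_degree : Int) (lamda : Int) (out : Int) : Prop := out = compute_max_terms_per_edge_for_path_deprecated_alt path_length max_node_degree lamda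
instance (path_length : Int) (max_node_degree : Int) (lamda : Int) (out : Int) : Decidable (Spec_compute_max_terms_per_edge_for_path_deprecated path_length max_node_degree lamda out) := by unfold Spec_compute_max_terms_per_edge_for_path_deprecated; infer_instance

-- ===== CLAIM (what is proved, stated in full; the proofs are below) =====
def Claim_equal_compute_max_terms_per_edge_for_path_deprecated : Prop := ∀ (path_length : Int) (max_node_degree : Int) (lamda : Int), Dom_compute_max_terms_per_edge_for_path_deprecated path_length max_node_degree lamda → Pre_compute_max_terms_per_edge_for_path_deprecated path_length max_node_degree lamda → Spec_compute_max_terms_per_edge_for_path_deprecated path_length max_node_degree lamda (compute_max_terms_per_edge_for_path_deprecated path_length max_node_degree lamda)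

-- ===== LEMMAS AND PROOFS =====

lemma pv_floordiv_mul_cancel (b q : Int) (h : b ≠ 0) : PySem.Int.floordiv (b * q) b = q := by
  simp [PySem.Int.floordiv, Int.mul_fdiv_cancel_left _ h]

-- A's loop equals 2*l*d*(geometric sum)
lemma pv_loop_sum (d l : Int) (n : Nat) :
    (PySem.List.pyRange 0 (n : Int) 1).foldl (fun acc i => acc + 2 * l * d ^ (i + 1).toNat) 0
    = 2 * l * (d * ∑ i ∈ Finset.range n, d ^ i) := by
  induction n with
  | zero => simp [PySem.List.pyRange_one_eq_nil]
  | succ n ih =>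
    have h1 : ((n + 1 : Nat) : Int) = (n : Int) + 1 := by push_cast; ring
    rw [h1, PySem.List.pyRange_one_succ_right (by positivity), List.foldl_append, ih]
    have h2 : ((n : Int) + 1).toNat = n + 1 := by omega
    simp only [List.foldl_cons, List.foldl_nil, h2, Finset.sum_range_succ]
    ring

-- the geometric sum in closed form (B's formula)
lemma pv_loop_closed (d l : Int) (n : Nat) :
    2 * l * (d * ∑ i ∈ Finset.range n, d ^ i)
    = if d = 1 then 2 * l * (n : Int)
      else PySem.Int.floordiv (2 * l * (d ^ (n + 1) - d)) (d - 1) := by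
  split_ifs with hd
  · subst hd; simp [mul_assoc]
  · have hne : d - 1 ≠ 0 := sub_ne_zero.mpr hd
    have hg := geom_sum_mul d n
    have key : 2 * l * (d ^ (n + 1) - d) = (d - 1) * (2 * l * (d * ∑ i ∈ Finset.range n, d ^ i)) := by
      have h4 : d ^ (n + 1) - d = d * (d ^ n - 1) := by ring
      rw [h4, ← hg]; ring
    rw [key, pv_floordiv_mul_cancel _ _ hne]

-- ===== VERDICT (by name: the statement is the Claim_ definition above) =====
theorem compute_max_terms_per_edge_for_path_deprecated_spec : Claim_equal_compute_max_terms_per_edge_for_path_deprecated := by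
  intro pl d l _ hpre
  unfold Spec_compute_max_terms_per_edge_for_path_deprecated
  unfold compute_max_terms_per_edge_for_path_deprecated compute_max_terms_per_edge_for_path_deprecated_alt
  have hpre' : (1 : Int) ≤ pl := hpre
  have hhop : 0 ≤ PySem.Int.floordiv (pl - 1) 2 := by
    rw [PySem.Int.floordiv_eq_ediv_of_pos (by norm_num)]
    omega
  obtain ⟨n, hn⟩ := Int.eq_ofNat_of_zero_le hhop
  simp only [hn]
  have h2 : ((n : Int)).toNat = n := by omega
  have h3 : ((n : Int) + 1).toNat = n + 1 := by omega
  rw [pv_loop_sum, pv_loop_closed, h2, h3]
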